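-- pv_equiv track=rewrite | github.com/espasmo/tarefa1 | codigo.py | abb
-- ===== SOURCE A (Python) =====
-- def abb(line):
--     s = "s0"
--     for letra in line:
--         if s == "s0" and letra == 'c':
--             s = "Morte"
--         elif s == "s0" and letra == 'b':
--             s = "s0"
--         elif s == "s0" and letra == 'a':
--             s = "s0b"
--         elif s == 'Morte' and letra == 'c':
--             s = "Morte"
--         elif s == 'Morte' and letra == 'b':
--             s = "Morte"
--         elif s == 'Morte' and letra == 'a':
--             s = "Morte"
--         elif s == 's0b' and letra == 'c':
--             s = "Morte"
--         elif s == 's0b' and letra == 'b':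
--             s = "s1b"
--         elif s == 's0b' and letra == 'a':
--             s = "Morte"
--         elif s == 's1b' and letra == 'c':
--             s = "Morte"
--         elif s == 's1b' and letra == 'b':
--             s = "s0"
--         elif s == 's1b' and letra == 'a':
--             s = "Morte"
--         elif letra != '\n':
--             return("nao pertencimento")
--     if (s == "s0"):
--         return("pertencimento")
--     else:
--         return("nao pertencimento")
-- ===== SOURCE B (Python) =====
-- def abb(line):
--     # Recognize (b|abb)* over the input with newlines ignored; no DFA state variable:
--     # strip newlines once, then greedily consume one token ('b' or 'abb') per step.
--     s = line.replace('\n', '')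
--     i = 0
--     n = len(s)
--     while i < n:
--         if s[i] == 'b':
--             i += 1
--         elif s.startswith('abb', i):
--             i += 3
--         else:
--             return "nao pertencimento"
--     return "pertencimento"
-- ===== Notes on version B (the rewrite author's own statement) =====
-- stated objective: simpler
-- what changed: Replaces the 4-state explicit DFA with a 12-branch elif chain by a greedy tokenizer: strip newlines once, then repeatedly consume a 'b' or 'abb' token; accept iff the whole string is consumed.
import Mathlib
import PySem

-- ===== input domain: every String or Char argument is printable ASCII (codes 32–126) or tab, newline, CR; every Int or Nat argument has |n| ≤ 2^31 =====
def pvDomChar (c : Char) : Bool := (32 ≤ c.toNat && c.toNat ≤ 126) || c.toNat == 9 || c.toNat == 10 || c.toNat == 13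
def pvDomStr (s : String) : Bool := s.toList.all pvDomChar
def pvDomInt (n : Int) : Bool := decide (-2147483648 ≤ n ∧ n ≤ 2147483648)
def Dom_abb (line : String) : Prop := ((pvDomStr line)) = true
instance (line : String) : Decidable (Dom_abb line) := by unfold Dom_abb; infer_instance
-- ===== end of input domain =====

-- B replaces A's explicit 4-state DFA elif-chain by a greedy tokenizer over the
-- newline-stripped string, consuming one 'b' or 'abb' token per step (simpler, same cost).


-- ===== PORT A =====
-- Literal transliteration of A: the for-loop with early return becomes structural
-- recursion over the characters carrying the state string s; the elif chain is kept verbatim.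
def abbLoop : List Char → String → String
  | [], s => if s == "s0" then "pertencimento" else "nao pertencimento"
  | c :: rest, s =>
    if s == "s0" && c == 'c' then abbLoop rest "Morte"
    else if s == "s0" && c == 'b' then abbLoop rest "s0"
    else if s == "s0" && c == 'a' then abbLoop rest "s0b"
    else if s == "Morte" && c == 'c' then abbLoop rest "Morte"
    else if s == "Morte" && c == 'b' then abbLoop rest "Morte"
    else if s == "Morte" && c == 'a' then abbLoop rest "Morte"
    else if s == "s0b" && c == 'c' then abbLoop rest "Morte"
    else if s == "s0b" && c == 'b' then abbLoop rest "s1b"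
    else if s == "s0b" && c == 'a' then abbLoop rest "Morte"
    else if s == "s1b" && c == 'c' then abbLoop rest "Morte"
    else if s == "s1b" && c == 'b' then abbLoop rest "s0"
    else if s == "s1b" && c == 'a' then abbLoop rest "Morte"
    else if c != '\n' then "nao pertencimento"
    else abbLoop rest s

def abb (line : String) : String := abbLoop line.toList "s0"

-- ===== PORT B =====
-- Transliteration of Source B: line.replace('\n','') removes every newline (exact: filter);
-- the while loop consuming one token ('b', or 'abb' via startswith at i) per step becomes
-- structural recursion on the remaining suffix of the cleaned character list.
def abbAltLoop : List Char → String
  | [] => "pertencimento"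
  | c :: rest =>
    if c = 'b' then abbAltLoop rest
    else if c = 'a' then
      -- s.startswith('abb', i): the next two characters must both be 'b'
      match rest with
      | b1 :: b2 :: rest2 =>
        if b1 = 'b' ∧ b2 = 'b' then abbAltLoop rest2 else "nao pertencimento"
      | _ => "nao pertencimento"
    else "nao pertencimento"

def abb_alt (line : String) : String :=
  abbAltLoop (line.toList.filter (fun c => c != '\n'))

-- ===== PRECONDITION & SPEC =====
def Spec_abb (line : String) (out : String) : Prop := out = abb_alt line
instance (line : String) (out : String) : Decidable (Spec_abb line out) := by unfold Spec_abb; infer_instance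

-- ===== CLAIM (what is proved, stated in full; the proofs are below) =====
def Claim_equal_abb : Prop := ∀ (line : String), Dom_abb line → Spec_abb line (abb line)

-- ===== LEMMAS AND PROOFS =====

-- B-side views of A's intermediate states s0b ("still need 'bb'") and s1b ("still need 'b'").
def altNeedB : List Char → String
  | [] => "nao pertencimento"
  | c :: rest => if c = 'b' then abbAltLoop rest else "nao pertencimento"
def altNeedBB : List Char → String
  | [] => "nao pertencimento"
  | c :: rest => if c = 'b' then altNeedB rest else "nao pertencimento"

theorem altLoop_b (l : List Char) : abbAltLoop ('b' :: l) = abbAltLoop l := by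
  match l with
  | [] => simp [abbAltLoop]
  | [d] => simp [abbAltLoop]
  | d :: e :: r => simp [abbAltLoop]

theorem altLoop_other (c : Char) (hb : c ≠ 'b') (ha : c ≠ 'a') (l : List Char) :
    abbAltLoop (c :: l) = "nao pertencimento" := by
  match l with
  | [] => simp [abbAltLoop, hb, ha]
  | [d] => simp [abbAltLoop, hb, ha]
  | d :: e :: r => simp [abbAltLoop, hb, ha]

theorem altLoop_a (l : List Char) : abbAltLoop ('a' :: l) = altNeedBB l := by
  match l with
  | [] => simp [abbAltLoop, altNeedBB]
  | [c] => simp only [abbAltLoop, altNeedBB, altNeedB]; split_ifs <;> simp_all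
  | b1 :: b2 :: r =>
    simp only [abbAltLoop, altNeedBB, altNeedB]
    split_ifs <;> simp_all

theorem abbLoop_eq (cs : List Char) :
    abbLoop cs "s0" = abbAltLoop (cs.filter (fun c => c != '\n'))
    ∧ abbLoop cs "s0b" = altNeedBB (cs.filter (fun c => c != '\n'))
    ∧ abbLoop cs "s1b" = altNeedB (cs.filter (fun c => c != '\n'))
    ∧ abbLoop cs "Morte" = "nao pertencimento" := by
  induction cs with
  | nil => exact ⟨rfl, rfl, rfl, rfl⟩
  | cons c rest ih =>
    obtain ⟨ih0, ihbb, ihb, ihm⟩ := ih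
    by_cases hc : c = 'c'
    · subst hc
      refine ⟨?_, ?_, ?_, ?_⟩ <;>
        simp [abbLoop, altLoop_other, altNeedBB, altNeedB, ihm]
    · by_cases hb : c = 'b'
      · subst hb
        refine ⟨?_, ?_, ?_, ?_⟩ <;>
          simp [abbLoop, altLoop_b, altNeedBB, altNeedB, ih0, ihb, ihm]
      · by_cases ha : c = 'a'
        · subst ha
          refine ⟨?_, ?_, ?_, ?_⟩ <;>
            simp [abbLoop, altLoop_a, altNeedBB, altNeedB, ihbb, ihm]
        · by_cases hn : c = '\n'
          · subst hn
            refine ⟨?_, ?_, ?_, ?_⟩ <;>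
              simp [abbLoop, ih0, ihbb, ihb, ihm]
          · refine ⟨?_, ?_, ?_, ?_⟩ <;>
              simp [abbLoop, altLoop_other c hb ha, altNeedBB, altNeedB, hc, hb, ha, hn]

-- ===== VERDICT (by name: the statement is the Claim_ definition above) =====
theorem abb_spec : Claim_equal_abb := by
  intro line _
  unfold Spec_abb abb abb_alt
  exact (abbLoop_eq line.toList).1
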